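-- pv_equiv track=rewrite | github.com/eduardofrois/script-task | demand_parser.py | split_demands
-- ===== SOURCE A (Python) =====
-- def split_demands(text: str) -> list[str]:
--     raw = text.replace("\r\n", "\n").replace("\r", "\n").strip()
--     if not raw:
--         return []
--     blocks: list[str] = []
--     current: list[str] = []
--     for line in raw.split("\n"):
--         if line.strip() == "----":
--             if current:
--                 blocks.append("\n".join(current).strip())
--                 current = []
--         else:
--             current.append(line)
--     if current:
--         blocks.append("\n".join(current).strip())
--     return blocks
-- ===== SOURCE B (Python) =====
-- def split_demands(text: str) -> list[str]:
--     raw = text.replace("\r\n", "\n").replace("\r", "\n").strip()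
--     if not raw:
--         return []
--     lines = raw.split("\n")
--     n = len(lines)
--     blocks: list[str] = []
--     i = 0
--     while i < n:
--         if lines[i].strip() == "----":
--             i += 1
--         else:
--             j = i
--             while j < n and lines[j].strip() != "----":
--                 j += 1
--             blocks.append("\n".join(lines[i:j]).strip())
--             i = j
--     return blocks
-- ===== Notes on version B (the rewrite author's own statement) =====
-- stated objective: alternative
-- what changed: Replaces A's per-line accumulator loop (building a 'current' list and flushing it at each delimiter and at the end) with a two-pointer scan that skips delimiter lines and slices out each maximal non-delimiter run in one step.
import Mathlib
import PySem

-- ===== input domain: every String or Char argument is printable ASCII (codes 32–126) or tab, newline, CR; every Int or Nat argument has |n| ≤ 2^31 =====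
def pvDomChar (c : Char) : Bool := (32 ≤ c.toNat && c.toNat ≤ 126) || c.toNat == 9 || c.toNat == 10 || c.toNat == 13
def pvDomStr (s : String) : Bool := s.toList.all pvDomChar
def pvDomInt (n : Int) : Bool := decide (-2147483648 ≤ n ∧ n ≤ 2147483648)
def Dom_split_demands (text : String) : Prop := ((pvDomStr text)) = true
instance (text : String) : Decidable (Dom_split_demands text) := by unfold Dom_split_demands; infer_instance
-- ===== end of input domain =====

-- B replaces A's accumulator loop with a two-pointer scan slicing out maximal non-delimiter runs (alternative decomposition, same cost).

-- ===== PORT A =====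
-- one step of A's for-loop over the lines; state = (blocks, current)
def pvStepA (st : List String × List String) (line : String) : List String × List String :=
  if PySem.Str.strip line = "----" then
    if st.2 = [] then st
    else (st.1 ++ [PySem.Str.strip (PySem.Str.join "\n" st.2)], [])
  else (st.1, st.2 ++ [line])

-- the final 'if current: blocks.append(...)'
def pvFlushA (st : List String × List String) : List String :=
  if st.2 = [] then st.1
  else st.1 ++ [PySem.Str.strip (PySem.Str.join "\n" st.2)]

def split_demands (text : String) : List String :=
  let raw := PySem.Str.strip (PySem.Str.replace (PySem.Str.replace text "\r\n" "\n") "\r" "\n")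
  if raw = "" then []
  else pvFlushA (((PySem.Str.split? raw "\n").getD []).foldl pvStepA ([], []))

-- ===== PORT B =====
-- B's inner while loop: advance j past the current non-delimiter run
def pvInnerJ (rest : List String) (j : Nat) : Nat :=
  if h : j < rest.length ∧ PySem.Str.strip (rest.getD j "") ≠ "----" then pvInnerJ rest (j + 1)
  else j
termination_by rest.length - j
decreasing_by omega

theorem pvInnerJ_ge (rest : List String) (j : Nat) : j ≤ pvInnerJ rest j := by
  fun_induction pvInnerJ rest j with
  | case1 j h ih => omega
  | case2 j h => omega

theorem pvInnerJ_pos (r0 : String) (rs : List String) (h : ¬ PySem.Str.strip r0 = "----") :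
    1 ≤ pvInnerJ (r0 :: rs) 0 := by
  rw [pvInnerJ]
  rw [dif_pos ⟨by simp, by simpa using h⟩]
  exact pvInnerJ_ge _ _

-- B's outer while loop, recursing on the remaining lines
def pvAltLoop (blocks : List String) (rest : List String) : List String :=
  match rest with
  | [] => blocks
  | r0 :: rs =>
    if PySem.Str.strip r0 = "----" then pvAltLoop blocks rs
    else
      let j := pvInnerJ (r0 :: rs) 0
      pvAltLoop (blocks ++ [PySem.Str.strip (PySem.Str.join "\n" ((r0 :: rs).take j))])
        ((r0 :: rs).drop j)
termination_by rest.length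
decreasing_by
  · simp
  · have := pvInnerJ_pos r0 rs (by assumption)
    simp only [List.length_drop, List.length_cons]
    omega

def split_demands_alt (text : String) : List String :=
  let raw := PySem.Str.strip (PySem.Str.replace (PySem.Str.replace text "\r\n" "\n") "\r" "\n")
  if raw = "" then []
  else pvAltLoop [] ((PySem.Str.split? raw "\n").getD [])

-- ===== PRECONDITION & SPEC =====
def Spec_split_demands (text : String) (out : List String) : Prop := out = split_demands_alt text
instance (text : String) (out : List String) : Decidable (Spec_split_demands text out) := by unfold Spec_split_demands; infer_instance

-- ===== CLAIM (what is proved, stated in full; the proofs are below) =====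
def Claim_equal_split_demands : Prop := ∀ (text : String), Dom_split_demands text → Spec_split_demands text (split_demands text)

-- ===== LEMMAS AND PROOFS =====
def pvP (l : String) : Bool := decide (PySem.Str.strip l ≠ "----")

theorem pvInnerJ_eq (rest : List String) (j : Nat) :
    pvInnerJ rest j = j + ((rest.drop j).takeWhile pvP).length := by
  fun_induction pvInnerJ rest j with
  | case1 j h ih =>
    obtain ⟨hj, hne⟩ := h
    have hd : rest.drop j = rest[j] :: rest.drop (j + 1) := List.drop_eq_getElem_cons hj
    have hget : rest.getD j "" = rest[j] := by
      simp [List.getD, List.getElem?_eq_getElem hj]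
    rw [hd, List.takeWhile_cons, if_pos (by rw [← hget] at *; simp [pvP]; exact hne)]
    simp [ih]; omega
  | case2 j h =>
    rcases Nat.lt_or_ge j rest.length with hj | hj
    · have hne : PySem.Str.strip (rest.getD j "") = "----" := by tauto
      have hd : rest.drop j = rest[j] :: rest.drop (j + 1) := List.drop_eq_getElem_cons hj
      have hget : rest.getD j "" = rest[j] := by
        simp [List.getD, List.getElem?_eq_getElem hj]
      rw [hd, List.takeWhile_cons, if_neg (by rw [← hget] at *; simp [pvP]; exact hne)]
      simp
    · simp [List.drop_eq_nil_of_le hj]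

theorem pvFoldRun (t : List String) (hp : ∀ l ∈ t, pvP l = true) (b c : List String) :
    t.foldl pvStepA (b, c) = (b, c ++ t) := by
  induction t generalizing c with
  | nil => simp
  | cons x xs ih =>
    have hx : ¬ PySem.Str.strip x = "----" := by
      have := hp x (by simp); simpa [pvP] using this
    simp only [List.foldl_cons, pvStepA, if_neg hx]
    rw [ih (fun l hl => hp l (by simp [hl]))]
    simp

theorem pvDropWhileHead (l : List String) (x : String) (ds : List String)
    (h : l.dropWhile pvP = x :: ds) : pvP x = false := by
  induction l with
  | nil => simp at h
  | cons y ys ih =>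
    by_cases hy : pvP y = true
    · rw [List.dropWhile_cons_of_pos hy] at h; exact ih h
    · rw [List.dropWhile_cons_of_neg hy] at h
      cases h; simpa using hy

theorem pvMainLoop (rest blocks : List String) :
    pvFlushA (rest.foldl pvStepA (blocks, [])) = pvAltLoop blocks rest := by
  match rest with
  | [] => simp [pvFlushA, pvAltLoop]
  | r0 :: rs =>
    by_cases hdelim : PySem.Str.strip r0 = "----"
    · rw [pvAltLoop, if_pos hdelim, ← pvMainLoop rs blocks]
      simp [pvStepA, hdelim]
    · rw [pvAltLoop, if_neg hdelim,
        ← pvMainLoop ((r0 :: rs).drop (pvInnerJ (r0 :: rs) 0))]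
      have hjval : pvInnerJ (r0 :: rs) 0 = ((r0 :: rs).takeWhile pvP).length := by
        rw [pvInnerJ_eq]; simp
      have htake : (r0 :: rs).take (pvInnerJ (r0 :: rs) 0) = (r0 :: rs).takeWhile pvP := by
        have h2 := @List.take_left _ ((r0 :: rs).takeWhile pvP) ((r0 :: rs).dropWhile pvP)
        rw [List.takeWhile_append_dropWhile] at h2
        rw [hjval, h2]
      have hdrop : (r0 :: rs).drop (pvInnerJ (r0 :: rs) 0) = (r0 :: rs).dropWhile pvP := by
        have h2 := @List.drop_left _ ((r0 :: rs).takeWhile pvP) ((r0 :: rs).dropWhile pvP)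
        rw [List.takeWhile_append_dropWhile] at h2
        rw [hjval, h2]
      have htne : (r0 :: rs).takeWhile pvP ≠ [] := by
        rw [List.takeWhile_cons, if_pos (by simp [pvP, hdelim])]
        simp
      rw [htake, hdrop]
      have hfold : (r0 :: rs).foldl pvStepA (blocks, []) =
          ((r0 :: rs).dropWhile pvP).foldl pvStepA (blocks, (r0 :: rs).takeWhile pvP) := by
        conv_lhs => rw [← List.takeWhile_append_dropWhile (p := pvP) (l := r0 :: rs)]
        rw [List.foldl_append, pvFoldRun _ (fun l hl => List.mem_takeWhile_imp hl) blocks []]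
        simp only [List.nil_append]
      rw [hfold]
      cases hdw : (r0 :: rs).dropWhile pvP with
      | nil => simp [pvFlushA, htne]
      | cons x ds =>
        have hx : PySem.Str.strip x = "----" := by
          have := pvDropWhileHead (r0 :: rs) x ds hdw
          simpa [pvP] using this
        simp [pvStepA, hx, htne]
termination_by rest.length
decreasing_by
  · simp
  · have := pvInnerJ_pos r0 rs hdelim
    simp only [List.length_drop, List.length_cons]
    omega

-- ===== VERDICT (by name: the statement is the Claim_ definition above) =====
theorem split_demands_spec : Claim_equal_split_demands := by
  intro text _
  show split_demands text = split_demands_alt text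
  simp only [split_demands, split_demands_alt]
  split_ifs with h
  · rfl
  · exact pvMainLoop _ _
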